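-- pv_equiv track=rewrite | github.com/Anjan14/Intro-to-AI---Prog-Assignment-1 | 8Puzzle_8Queens.py | hill_climbing_queens
-- ===== SOURCE A (Python) =====
-- def attacking_pairs(state):
--     """
--     Function to calculate the number of attacking pairs in the 8-queens state.
--     Args:
--         state (list): Current state of the 8-queens.
--     Returns:
--         int: Number of attacking pairs in the state.
--     """
--     conflicts = 0
--     n = len(state)
--     for i in range(n):
--         for j in range(i+1, n):
--             if state[i] == state[j] or abs(state[i] - state[j]) == j - i:
--                 conflicts += 1
--     return conflicts
--
-- def get_queen_neighbors(state):
--     """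
--     Function to get the neighboring states of the current 8-queens state.
--     Args:
--         state (list): Current state of the 8-queens.
--     Returns:
--         list: List of neighboring states
--     """
--     neighbors = []
--     for col in range(8):
--         current_row = state[col]
--         for row in range(8):
--             if row != current_row:
--                 new_state = state.copy()
--                 new_state[col] = row
--                 neighbors.append(new_state)
--     return neighbors
--
-- def hill_climbing_queens(initial_state):
--     """
--     Function to solve the 8-queens using hill climbing with random restarts.
--     Args:
--         initial_state (list): Initial state of the 8-queens.
--     Returns:
--         int: Minimum cost found by the algorithm.
--         list: State of the 8-queens with the minimum cost.
--     """
--     current_state = initial_state.copy()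
--     current_cost = attacking_pairs(current_state)
--     best_state = current_state.copy()
--     best_cost = current_cost
--     while True:
--         neighbors = get_queen_neighbors(current_state)
--         min_neighbor_cost = current_cost
--         best_neighbor = current_state
--         for neighbor in neighbors:
--             cost = attacking_pairs(neighbor)
--             if cost < min_neighbor_cost:
--                 min_neighbor_cost = cost
--                 best_neighbor = neighbor.copy()
--         if min_neighbor_cost < current_cost:
--             current_state = best_neighbor
--             current_cost = min_neighbor_cost
--             if current_cost < best_cost:
--                 best_cost = current_cost
--                 best_state = current_state.copy()
--         else:
--             break
--     return best_cost, best_state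
-- ===== SOURCE B (Python) =====
-- def attacking_pairs_fast(state):
--     """Count attacking pairs via row/diagonal/anti-diagonal tallies in one pass."""
--     conflicts = 0
--     rows = {}
--     diag = {}
--     anti = {}
--     for i, v in enumerate(state):
--         conflicts += rows.get(v, 0) + diag.get(v - i, 0) + anti.get(v + i, 0)
--         rows[v] = rows.get(v, 0) + 1
--         diag[v - i] = diag.get(v - i, 0) + 1
--         anti[v + i] = anti.get(v + i, 0) + 1
--     return conflicts
--
-- def hill_climbing_queens(initial_state):
--     state = initial_state.copy()
--     cost = attacking_pairs_fast(state)
--     while True: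
--         best_cost = cost
--         best_move = None
--         for col in range(8):
--             current_row = state[col]
--             for row in range(8):
--                 if row != current_row:
--                     candidate = state.copy()
--                     candidate[col] = row
--                     c = attacking_pairs_fast(candidate)
--                     if c < best_cost:
--                         best_cost = c
--                         best_move = candidate
--         if best_move is None:
--             return cost, state
--         state = best_move
--         cost = best_cost
-- ===== Notes on version B (the rewrite author's own statement) =====
-- stated objective: faster
-- what changed: The O(n^2) pairwise attacking_pairs count is replaced by a single pass tallying queens into row, (v-i)-diagonal and (v+i)-anti-diagonal hash tables (the three conflict kinds are disjoint per pair), and the search loop drops the materialised neighbours list and the redundant best-state bookkeeping, scanning the 64 moves directly.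
import Mathlib
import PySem

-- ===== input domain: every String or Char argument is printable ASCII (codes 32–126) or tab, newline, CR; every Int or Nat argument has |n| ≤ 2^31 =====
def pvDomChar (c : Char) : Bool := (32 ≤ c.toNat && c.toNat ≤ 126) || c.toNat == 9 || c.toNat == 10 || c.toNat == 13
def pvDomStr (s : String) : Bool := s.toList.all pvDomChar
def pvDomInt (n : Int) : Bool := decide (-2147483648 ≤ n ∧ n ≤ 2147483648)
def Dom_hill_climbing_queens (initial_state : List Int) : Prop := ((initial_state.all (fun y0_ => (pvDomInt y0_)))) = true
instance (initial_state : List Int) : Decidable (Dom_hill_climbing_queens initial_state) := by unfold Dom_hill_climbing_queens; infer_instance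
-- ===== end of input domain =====

-- B replaces A's O(n^2) pairwise conflict count by a one-pass tally over row/diagonal/anti-diagonal
-- keys and drops the redundant neighbours list and best-state bookkeeping; same search trajectory.

-- ===== PORT A =====
def attacking_pairs (state : List Int) : Int :=
  let n := PySem.List.len state
  List.foldl (fun conflicts i =>
    List.foldl (fun conflicts j =>
      if PySem.List.pyGetD state i 0 = PySem.List.pyGetD state j 0 ∨
         |PySem.List.pyGetD state i 0 - PySem.List.pyGetD state j 0| = j - i
      then conflicts + 1 else conflicts)
      conflicts (PySem.List.pyRange (i+1) n))
    0 (PySem.List.pyRange 0 n)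

def get_queen_neighbors (state : List Int) : List (List Int) :=
  List.foldl (fun neighbors col =>
    let current_row := PySem.List.pyGetD state col 0
    List.foldl (fun neighbors row =>
      if row ≠ current_row then neighbors ++ [state.set col.toNat row] else neighbors)
      neighbors (PySem.List.pyRange 0 8))
    [] (PySem.List.pyRange 0 8)

-- the while-True loop; fuel (initial cost + 1) strictly dominates the number of iterations,
-- since current_cost is a nonnegative count that strictly decreases at every iteration
def hill_loop : Nat → List Int → Int → List Int → Int → Int × List Int
  | 0, _, _, best_state, best_cost => (best_cost, best_state)
  | fuel+1, current_state, current_cost, best_state, best_cost =>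
    let p := List.foldl
        (fun (p : Int × List Int) neighbor =>
          let cost := attacking_pairs neighbor
          if cost < p.1 then (cost, neighbor) else p)
        (current_cost, current_state) (get_queen_neighbors current_state)
    if p.1 < current_cost then
      if p.1 < best_cost then hill_loop fuel p.2 p.1 p.2 p.1
      else hill_loop fuel p.2 p.1 best_state best_cost
    else (best_cost, best_state)

def hill_climbing_queens (initial_state : List Int) : Int × List Int :=
  let current_cost := attacking_pairs initial_state
  hill_loop (current_cost.toNat + 1) initial_state current_cost initial_state current_cost

-- ===== PORT B =====
-- loop body of attacking_pairs_fast: tally rows / (v-i) diagonals / (v+i) anti-diagonals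
def count_step (st : PySem.Dict Int Int × PySem.Dict Int Int × PySem.Dict Int Int × Int)
    (iv : Int × Int) : PySem.Dict Int Int × PySem.Dict Int Int × PySem.Dict Int Int × Int :=
  match st, iv with
  | (rows, diag, anti, conflicts), (i, v) =>
    (rows.insert v (rows.getD v 0 + 1),
     diag.insert (v - i) (diag.getD (v - i) 0 + 1),
     anti.insert (v + i) (anti.getD (v + i) 0 + 1),
     conflicts + rows.getD v 0 + diag.getD (v - i) 0 + anti.getD (v + i) 0)

def attacking_pairs_fast (state : List Int) : Int :=
  (List.foldl count_step (PySem.Dict.empty, PySem.Dict.empty, PySem.Dict.empty, 0)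
    (PySem.List.enumerate state)).2.2.2

def climb_loop : Nat → List Int → Int → Int × List Int
  | 0, state, cost => (cost, state)
  | fuel+1, state, cost =>
    let r := List.foldl
      (fun (p : Int × Option (List Int)) col =>
        let current_row := PySem.List.pyGetD state col 0
        List.foldl
          (fun (p : Int × Option (List Int)) row =>
            if row ≠ current_row then
              let candidate := state.set col.toNat row
              let c := attacking_pairs_fast candidate
              if c < p.1 then (c, some candidate) else p
            else p) p (PySem.List.pyRange 0 8))
      (cost, none) (PySem.List.pyRange 0 8)
    match r.2 with
    | none => (cost, state)
    | some st => climb_loop fuel st r.1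

def hill_climbing_queens_alt (initial_state : List Int) : Int × List Int :=
  let cost := attacking_pairs_fast initial_state
  climb_loop (cost.toNat + 1) initial_state cost

-- ===== PRECONDITION & SPEC =====
-- Python A raises IndexError (state[col] for col in range(8)) when the list has fewer than 8 entries.
def Pre_hill_climbing_queens (initial_state : List Int) : Prop := 8 ≤ initial_state.length
instance (initial_state : List Int) : Decidable (Pre_hill_climbing_queens initial_state) := by
  unfold Pre_hill_climbing_queens; infer_instance
def pvWitness_hill_climbing_queens : List Int := [0, 1, 2, 3, 4, 5, 6, 7]

def Spec_hill_climbing_queens (initial_state : List Int) (out : Int × List Int) : Prop := out = hill_climbing_queens_alt initial_state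
instance (initial_state : List Int) (out : Int × List Int) : Decidable (Spec_hill_climbing_queens initial_state out) := by unfold Spec_hill_climbing_queens; infer_instance

-- ===== CLAIM (what is proved, stated in full; the proofs are below) =====
def Claim_equal_hill_climbing_queens : Prop := ∀ (initial_state : List Int), Dom_hill_climbing_queens initial_state → Pre_hill_climbing_queens initial_state → Spec_hill_climbing_queens initial_state (hill_climbing_queens initial_state)

-- ===== LEMMAS AND PROOFS =====

-- the number of conflicts the queen appended at index xs.length adds (A's pairwise condition)
def newConf (xs : List Int) (v : Int) : Int :=
  ((PySem.List.pyRange 0 (xs.length : Int)).map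
    (fun i => if (PySem.List.pyGetD xs i 0 = v ∨
                  |PySem.List.pyGetD xs i 0 - v| = (xs.length : Int) - i) then (1:Int) else 0)).sum

-- conflicts of queen i with later queens, as a 0/1 sum (A's inner loop)
def rowSum (xs : List Int) (i : Int) : Int :=
  ((PySem.List.pyRange (i+1) (xs.length : Int)).map
    (fun j => if (PySem.List.pyGetD xs i 0 = PySem.List.pyGetD xs j 0 ∨
                  |PySem.List.pyGetD xs i 0 - PySem.List.pyGetD xs j 0| = j - i) then (1:Int) else 0)).sum

lemma foldl_ite_one (P : Int → Prop) [DecidablePred P] (l : List Int) (acc : Int) :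
    List.foldl (fun c j => if P j then c + 1 else c) acc l
      = acc + (l.map (fun j => if P j then (1:Int) else 0)).sum := by
  rw [PySem.List.foldl_congr_mem l _ (fun c j => c + (if P j then (1:Int) else 0)) acc
        (by intro a j _; by_cases h : P j <;> simp [h]),
      PySem.List.foldl_add]

lemma pyGetD_append_lt (xs : List Int) (v : Int) {i : Int} (h0 : 0 ≤ i) (h1 : i < (xs.length : Int)) :
    PySem.List.pyGetD (xs ++ [v]) i 0 = PySem.List.pyGetD xs i 0 := by
  rw [PySem.List.pyGetD_eq_getElem _ _ h0 (by simp; omega),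
      PySem.List.pyGetD_eq_getElem _ _ h0 h1]
  rw [List.getElem_append_left (by omega)]

lemma pyGetD_append_last (xs : List Int) (v : Int) :
    PySem.List.pyGetD (xs ++ [v]) (xs.length : Int) 0 = v := by
  rw [PySem.List.pyGetD_eq_getElem _ _ (by positivity) (by simp)]
  simp

lemma apA_sum (xs : List Int) :
    attacking_pairs xs = ((PySem.List.pyRange 0 (xs.length : Int)).map (rowSum xs)).sum := by
  unfold attacking_pairs
  simp only [PySem.List.len_eq]
  rw [PySem.List.foldl_congr_mem _ _ (fun acc i => acc + rowSum xs i) 0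
        (by intro acc i _; exact foldl_ite_one _ _ _),
      PySem.List.foldl_add, zero_add]

lemma apA_append (xs : List Int) (v : Int) :
    attacking_pairs (xs ++ [v]) = attacking_pairs xs + newConf xs v := by
  have hN : (0:Int) ≤ (xs.length : Int) := by positivity
  unfold attacking_pairs
  simp only [PySem.List.len_eq, List.length_append, List.length_cons, List.length_nil,
    Nat.cast_add, Nat.cast_one, zero_add]
  rw [PySem.List.pyRange_one_succ_right hN, List.foldl_append]
  simp only [List.foldl_cons, List.foldl_nil]
  rw [show PySem.List.pyRange ((xs.length:Int)+1) ((xs.length:Int)+1) = []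
        from PySem.List.pyRange_one_eq_nil le_rfl, List.foldl_nil]
  rw [PySem.List.foldl_congr_mem _ _
        (fun acc i => acc + (rowSum xs i +
          (if (PySem.List.pyGetD xs i 0 = v ∨
               |PySem.List.pyGetD xs i 0 - v| = (xs.length : Int) - i) then (1:Int) else 0))) 0 ?hstep]
  · rw [PySem.List.foldl_add, zero_add, PySem.List.sum_map_add_int, newConf]
    have h := apA_sum xs
    unfold attacking_pairs at h
    simp only [PySem.List.len_eq] at h
    rw [h]
  · intro acc i hi
    obtain ⟨hi0, hi1⟩ := PySem.List.mem_pyRange_one.1 hi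
    rw [PySem.List.pyRange_one_succ_right (by omega : i + 1 ≤ (xs.length:Int)), List.foldl_append]
    simp only [List.foldl_cons, List.foldl_nil]
    rw [pyGetD_append_lt xs v hi0 hi1, pyGetD_append_last,
        PySem.List.foldl_congr_mem _ _
          (fun c j => if (PySem.List.pyGetD xs i 0 = PySem.List.pyGetD xs j 0 ∨
             |PySem.List.pyGetD xs i 0 - PySem.List.pyGetD xs j 0| = j - i) then c + 1 else c) acc ?hin,
        foldl_ite_one, rowSum]
    · split_ifs <;> ring
    · intro a j hj
      obtain ⟨hj0, hj1⟩ := PySem.List.mem_pyRange_one.1 hj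
      rw [pyGetD_append_lt xs v (by omega) (by omega)]

-- B side: projections of the fold
lemma count_step_out (st : PySem.Dict Int Int × PySem.Dict Int Int × PySem.Dict Int Int × Int)
    (i v : Int) : (count_step st (i, v)).2.2.2
      = st.2.2.2 + st.1.getD v 0 + st.2.1.getD (v - i) 0 + st.2.2.1.getD (v + i) 0 := by
  obtain ⟨r, d, a, c⟩ := st; rfl
def keyFold (key : Int × Int → Int) (l : List (Int × Int)) (d : PySem.Dict Int Int) : PySem.Dict Int Int :=
  List.foldl (fun d iv => d.insert (key iv) (d.getD (key iv) 0 + 1)) d l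

lemma fold_count_fst (l : List (Int × Int)) (st : _) :
    (List.foldl count_step st l).1 = keyFold (fun iv => iv.2) l st.1 := by
  induction l generalizing st with
  | nil => rfl
  | cons x t ih =>
    obtain ⟨r, d, a, c⟩ := st; obtain ⟨i, v⟩ := x
    simp only [List.foldl_cons, count_step, keyFold, ih]

lemma fold_count_diag (l : List (Int × Int)) (st : _) :
    (List.foldl count_step st l).2.1 = keyFold (fun iv => iv.2 - iv.1) l st.2.1 := by
  induction l generalizing st with
  | nil => rfl
  | cons x t ih =>
    obtain ⟨r, d, a, c⟩ := st; obtain ⟨i, v⟩ := x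
    simp only [List.foldl_cons, count_step, keyFold, ih]

lemma fold_count_anti (l : List (Int × Int)) (st : _) :
    (List.foldl count_step st l).2.2.1 = keyFold (fun iv => iv.2 + iv.1) l st.2.2.1 := by
  induction l generalizing st with
  | nil => rfl
  | cons x t ih =>
    obtain ⟨r, d, a, c⟩ := st; obtain ⟨i, v⟩ := x
    simp only [List.foldl_cons, count_step, keyFold, ih]

lemma getD_keyFold (key : Int × Int → Int) (l : List (Int × Int)) (d : PySem.Dict Int Int) (k : Int) :
    (keyFold key l d).getD k 0
      = d.getD k 0 + (l.map (fun iv => if key iv = k then (1:Int) else 0)).sum := by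
  induction l generalizing d with
  | nil => simp [keyFold]
  | cons x t ih =>
    simp only [keyFold, List.foldl_cons] at ih ⊢
    rw [ih, PySem.Dict.getD_insert, List.map_cons, List.sum_cons]
    by_cases h : k = key x
    · subst h; rw [if_pos rfl, if_pos rfl]; ring
    · rw [if_neg h, if_neg (fun hh => h hh.symm)]; ring

-- row + diagonal + anti-diagonal matches of the appended queen = A's pairwise condition, per index
lemma sum3_eq_newConf (xs : List Int) (v : Int) :
    ((PySem.List.enumerate xs).map (fun iv => if iv.2 = v then (1:Int) else 0)).sum
      + (((PySem.List.enumerate xs).map (fun iv => if iv.2 - iv.1 = v - (xs.length:Int) then (1:Int) else 0)).sum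
      + ((PySem.List.enumerate xs).map (fun iv => if iv.2 + iv.1 = v + (xs.length:Int) then (1:Int) else 0)).sum)
      = newConf xs v := by
  rw [PySem.List.enumerate_eq_map_pyRange xs 0, newConf]
  simp only [List.map_map, PySem.List.len_eq, Function.comp_def]
  rw [← PySem.List.sum_map_add_int, ← PySem.List.sum_map_add_int]
  apply congrArg
  apply List.map_congr_left
  intro j hj
  obtain ⟨hj0, hj1⟩ := PySem.List.mem_pyRange_one.1 hj
  have habs : (|PySem.List.pyGetD xs j 0 - v| = (xs.length:Int) - j)
      ↔ (PySem.List.pyGetD xs j 0 - v = (xs.length:Int) - j ∨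
         PySem.List.pyGetD xs j 0 - v = -((xs.length:Int) - j)) := abs_eq (by omega)
  simp only [habs]
  split_ifs <;> omega

lemma apB_append (xs : List Int) (v : Int) :
    attacking_pairs_fast (xs ++ [v]) = attacking_pairs_fast xs + newConf xs v := by
  unfold attacking_pairs_fast
  rw [PySem.List.enumerate_append]
  simp only [List.foldl_append, PySem.List.enumerate, List.foldl_cons, List.foldl_nil]
  rw [count_step_out, fold_count_fst, fold_count_diag, fold_count_anti,
      getD_keyFold, getD_keyFold, getD_keyFold]
  simp only [PySem.Dict.getD_empty, zero_add]
  rw [add_assoc, add_assoc, ← sum3_eq_newConf xs v]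

lemma ap_eq (xs : List Int) : attacking_pairs xs = attacking_pairs_fast xs := by
  induction xs using List.reverseRecOn with
  | nil => decide
  | append_singleton xs v ih => rw [apA_append, apB_append, ih]

-- the relation between A's neighbour-scan state and B's
def ScanRel (c : Int) (s : List Int) (pa : Int × List Int) (pb : Int × Option (List Int)) : Prop :=
  pa.1 = pb.1 ∧ ((pb.2 = none ∧ pa.2 = s ∧ pa.1 = c) ∨ (pb.2 = some pa.2 ∧ pa.1 < c))

lemma scanRel_foldl (c : Int) (s : List Int) (L : List (List Int)) :
    ∀ pa pb, ScanRel c s pa pb →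
      ScanRel c s
        (List.foldl (fun (p : Int × List Int) nb =>
          if attacking_pairs nb < p.1 then (attacking_pairs nb, nb) else p) pa L)
        (List.foldl (fun (p : Int × Option (List Int)) nb =>
          if attacking_pairs nb < p.1 then (attacking_pairs nb, some nb) else p) pb L) := by
  induction L with
  | nil => exact fun pa pb h => h
  | cons x t ih =>
    intro pa pb h
    obtain ⟨h1, h2⟩ := h
    simp only [List.foldl_cons]
    apply ih
    by_cases hc : attacking_pairs x < pa.1
    · rw [if_pos hc, if_pos (h1 ▸ hc)]
      refine ⟨rfl, Or.inr ⟨rfl, ?_⟩⟩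
      rcases h2 with ⟨_, _, hec⟩ | ⟨_, hlt⟩ <;> omega
    · rw [if_neg hc, if_neg (h1 ▸ hc)]
      exact ⟨h1, h2⟩

lemma foldl_flatMap {α β γ : Type} (g : α → List β) (f : γ → β → γ) (l : List α) (init : γ) :
    List.foldl f init (l.flatMap g) = List.foldl (fun a x => List.foldl f a (g x)) init l := by
  induction l generalizing init with
  | nil => rfl
  | cons x t ih => simp [List.flatMap_cons, List.foldl_append, ih]

def moveList (s : List Int) : List (List Int) :=
  (PySem.List.pyRange 0 8).flatMap (fun col =>
    ((PySem.List.pyRange 0 8).filter (fun row => decide (row ≠ PySem.List.pyGetD s col 0))).map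
      (fun row => s.set col.toNat row))

lemma neighbors_eq (s : List Int) : get_queen_neighbors s = moveList s := by
  unfold get_queen_neighbors moveList
  rw [PySem.List.foldl_congr_mem _ _
        (fun acc col => acc ++
          ((PySem.List.pyRange 0 8).filter
            (fun row => decide (row ≠ PySem.List.pyGetD s col 0))).map
            (fun row => s.set col.toNat row)) []
        (by intro acc col _
            exact PySem.List.foldl_append_ite _ _ _ _),
      PySem.List.foldl_append_eq_flatMap, List.nil_append]

lemma scanB_nested (s : List Int) (c : Int) :
    List.foldl
      (fun (p : Int × Option (List Int)) col =>
        let current_row := PySem.List.pyGetD s col 0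
        List.foldl
          (fun (p : Int × Option (List Int)) row =>
            if row ≠ current_row then
              let candidate := s.set col.toNat row
              let c2 := attacking_pairs_fast candidate
              if c2 < p.1 then (c2, some candidate) else p
            else p) p (PySem.List.pyRange 0 8))
      (c, none) (PySem.List.pyRange 0 8)
    = List.foldl (fun (p : Int × Option (List Int)) nb =>
        if attacking_pairs_fast nb < p.1 then (attacking_pairs_fast nb, some nb) else p)
        (c, none) (moveList s) := by
  unfold moveList
  rw [foldl_flatMap]
  apply PySem.List.foldl_congr_mem
  intro p col _
  rw [List.foldl_map,
      ← PySem.List.foldl_ite_eq_foldl_filter (fun row => row ≠ PySem.List.pyGetD s col 0)]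

lemma loop_eq (fuel : Nat) : ∀ (s : List Int) (c : Int),
    hill_loop fuel s c s c = climb_loop fuel s c := by
  induction fuel with
  | zero => intro s c; rfl
  | succ n ih =>
    intro s c
    simp only [hill_loop, climb_loop]
    rw [neighbors_eq, scanB_nested]
    simp only [← ap_eq]
    have hrel := scanRel_foldl c s (moveList s) (c, s) (c, none) ⟨rfl, Or.inl ⟨rfl, rfl, rfl⟩⟩
    obtain ⟨h1, h2⟩ := hrel
    rcases h2 with ⟨hn, hs2, hc1⟩ | ⟨hsome, hlt⟩
    · simp only [hn, hc1, lt_irrefl, if_false]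
    · simp only [hsome, ih, h1]
      rw [if_pos (h1 ▸ hlt), if_pos (h1 ▸ hlt)]

-- ===== VERDICT (by name: the statement is the Claim_ definition above) =====
theorem hill_climbing_queens_spec : Claim_equal_hill_climbing_queens := by
  intro initial_state _ _
  unfold Spec_hill_climbing_queens hill_climbing_queens hill_climbing_queens_alt
  rw [← ap_eq, loop_eq]
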